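-- pv_equiv track=rewrite | github.com/sammysignal/twitter-gen-ai | get_tweet_sel.py | remove_actions
-- ===== SOURCE A (Python) =====
-- def remove_actions(tweet):
--     output = ""
--     add = True
--     last_was_space = False
--     for i in range(len(tweet)):
--         if tweet[i] == "*":
--             add = not add
--         else:
--             if last_was_space and tweet[i] == " ":
--                 pass
--             elif add:
--                 output = output + tweet[i]
--                 if tweet[i] == " ":
--                     last_was_space = True
--                 else:
--                     last_was_space = False
--     return output.strip()
-- ===== SOURCE B (Python) =====
-- def remove_actions(tweet):
--     # Split on '*': even-indexed segments are the kept text (the flag starts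
--     # True and flips at each '*').  Then collapsing runs of ' ' plus the final
--     # strip() is the same as joining the nonempty ' '-separated pieces with
--     # single spaces and stripping.
--     parts = tweet.split("*")
--     kept = "".join(p for i, p in enumerate(parts) if i % 2 == 0)
--     return " ".join([p for p in kept.split(" ") if p != ""]).strip()
-- ===== Notes on version B (the rewrite author's own statement) =====
-- stated objective: faster
-- what changed: Replaced the char-by-char state machine (toggle flag + last-was-space tracking, building the output by repeated string concatenation) by a split/join pipeline: split on '*', join the even-indexed segments, then join the nonempty ' '-separated pieces with single spaces and strip.
import Mathlib
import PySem

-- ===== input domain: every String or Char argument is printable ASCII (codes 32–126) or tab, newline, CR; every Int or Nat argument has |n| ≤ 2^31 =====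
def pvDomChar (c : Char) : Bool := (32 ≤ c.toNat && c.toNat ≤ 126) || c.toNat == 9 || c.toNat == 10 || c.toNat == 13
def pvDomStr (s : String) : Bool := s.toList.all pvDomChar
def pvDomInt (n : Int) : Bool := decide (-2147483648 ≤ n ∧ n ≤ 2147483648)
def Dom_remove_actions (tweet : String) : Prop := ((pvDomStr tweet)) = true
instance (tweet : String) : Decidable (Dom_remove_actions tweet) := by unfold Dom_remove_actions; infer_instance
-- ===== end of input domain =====

-- B replaces A's char-by-char state machine by an idiomatic split/join pipeline; same return value.

-- ===== PORT A =====
-- loop state: (output, add, last_was_space)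
def remAStep (st : List Char × Bool × Bool) (c : Char) : List Char × Bool × Bool :=
  if c = '*' then (st.1, !st.2.1, st.2.2)
  else if st.2.2 = true ∧ c = ' ' then st
  else if st.2.1 = true then (st.1 ++ [c], st.2.1, decide (c = ' '))
  else st

def remove_actions (tweet : String) : String :=
  let st := tweet.toList.foldl remAStep ([], true, false)
  String.ofList (PySem.Chars.strip st.1)

-- ===== PORT B =====
def remove_actions_alt (tweet : String) : String :=
  let parts := tweet.toList.splitOn '*'
  let kept := PySem.Chars.join []
    (((PySem.List.enumerate parts).filter (fun p => p.1 % 2 == 0)).map (·.2))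
  let pieces := (kept.splitOn ' ').filter (fun p => p ≠ [])
  String.ofList (PySem.Chars.strip (PySem.Chars.join [' '] pieces))

-- ===== PRECONDITION & SPEC =====
def Spec_remove_actions (tweet : String) (out : String) : Prop := out = remove_actions_alt tweet
instance (tweet : String) (out : String) : Decidable (Spec_remove_actions tweet out) := by unfold Spec_remove_actions; infer_instance

-- ===== CLAIM (what is proved, stated in full; the proofs are below) =====
def Claim_equal_remove_actions : Prop := ∀ (tweet : String), Dom_remove_actions tweet → Spec_remove_actions tweet (remove_actions tweet)

-- ===== LEMMAS AND PROOFS =====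

-- chars kept by the '*' toggle, starting from flag add
def keepC : Bool → List Char → List Char
  | _, [] => []
  | add, c :: t => if c = '*' then keepC (!add) t else if add = true then c :: keepC add t else keepC add t

-- space-collapse with the last-was-space flag
def collC : Bool → List Char → List Char
  | _, [] => []
  | lws, c :: t => if lws = true ∧ c = ' ' then collC lws t else c :: collC (decide (c = ' ')) t

-- even-indexed segments, concatenated
def evensC : List (List Char) → List Char
  | [] => []
  | [p] => p
  | p :: _ :: ps => p ++ evensC ps

-- jT / jF: what collC true / collC false produce on the ' '-split pieces
def jT : List (List Char) → List Char
  | [] => []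
  | [q] => q
  | q :: ps => if q = [] then jT ps else q ++ ' ' :: jT ps

def jF : List (List Char) → List Char
  | [] => []
  | [q] => q
  | q :: ps => q ++ ' ' :: jT ps

def interF (ps : List (List Char)) : List Char :=
  PySem.Chars.join [' '] (ps.filter (fun p => p ≠ []))

theorem evensC_cons (p : List Char) (t : List (List Char)) :
    evensC (p :: t) = p ++ evensC t.tail := by
  cases t <;> simp [evensC]

theorem foldA (l : List Char) : ∀ (out : List Char) (add lws : Bool),
    (l.foldl remAStep (out, add, lws)).1 = out ++ collC lws (keepC add l) := by
  induction l with
  | nil => intro out add lws; simp [keepC, collC]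
  | cons c t ih =>
    intro out add lws
    simp only [List.foldl_cons]
    by_cases hc : c = '*'
    · subst hc
      rw [show remAStep (out, add, lws) '*' = (out, !add, lws) by simp [remAStep]]
      rw [ih]
      simp [keepC]
    · by_cases hl : lws = true ∧ c = ' '
      · rw [show remAStep (out, add, lws) c = (out, add, lws) by simp [remAStep, hc, hl]]
        rw [ih]
        congr 1
        cases add with
        | false => simp [keepC, hc]
        | true => simp [keepC, hc, collC, hl.1, hl.2]
      · cases add with
        | false =>
          rw [show remAStep (out, false, lws) c = (out, false, lws) by simp [remAStep, hc, hl]]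
          rw [ih]
          simp [keepC, hc]
        | true =>
          rw [show remAStep (out, true, lws) c = (out ++ [c], true, decide (c = ' ')) by
                simp [remAStep, hc, hl]]
          rw [ih]
          simp [keepC, hc, collC, hl, List.append_assoc]

theorem join_nil_flatten (ps : List (List Char)) : PySem.Chars.join [] ps = ps.flatten := by
  induction ps with
  | nil => simp [PySem.Chars.join_nil]
  | cons q ps ih =>
    cases ps with
    | nil => simp [PySem.Chars.join_singleton]
    | cons r rs => rw [PySem.Chars.join_cons_cons]; simp [ih]

theorem enum_cons {α : Type} (x : α) (t : List α) (n : Int) :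
    PySem.List.enumerate (x :: t) n = (n, x) :: PySem.List.enumerate t (n + 1) := rfl

theorem enum_even (ps : List (List Char)) : ∀ (n : Int),
    (((PySem.List.enumerate ps n).filter (fun p => p.1 % 2 == 0)).map (·.2)).flatten
      = if n % 2 = 0 then evensC ps else evensC ps.tail := by
  induction ps with
  | nil =>
    intro n
    simp [PySem.List.enumerate, evensC]
  | cons p t ih =>
    intro n
    rw [enum_cons, List.filter_cons]
    by_cases hn : n % 2 = 0
    · have hb : ((n, p).1 % 2 == 0) = true := by simpa using hn
      have hn' : ¬ (n + 1) % 2 = 0 := by omega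
      rw [if_pos hb, List.map_cons, List.flatten_cons, ih (n + 1), if_neg hn', evensC_cons]
      simp [hn]
    · have hb : ¬ ((n, p).1 % 2 == 0) = true := by simpa using hn
      have hn' : (n + 1) % 2 = 0 := by omega
      rw [if_neg hb, ih (n + 1), if_pos hn']
      simp [hn]

theorem split_keep (l : List Char) :
    evensC (l.splitOn '*') = keepC true l ∧ evensC (l.splitOn '*').tail = keepC false l := by
  induction l with
  | nil => constructor <;> simp [List.splitOn, List.splitOnP_nil, evensC, keepC]
  | cons c t ih =>
    obtain ⟨q, qs, hS⟩ : ∃ q qs, t.splitOn '*' = q :: qs := by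
      rcases hS : t.splitOn '*' with _ | ⟨q, qs⟩
      · exact absurd hS (List.splitOnP_ne_nil _ _)
      · exact ⟨q, qs, rfl⟩
    have h1 := ih.1
    have h2 := ih.2
    rw [hS] at h1 h2
    by_cases hc : c = '*'
    · subst hc
      rw [show (('*' :: t).splitOn '*') = [] :: q :: qs by
            simp [List.splitOn, List.splitOnP_cons,
              show List.splitOnP (fun x => x == '*') t = q :: qs from hS]]
      constructor
      · rw [evensC_cons]; simpa [keepC] using h2
      · simpa [keepC] using h1
    · rw [show ((c :: t).splitOn '*') = (c :: q) :: qs by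
            simp [List.splitOn, List.splitOnP_cons, hc,
              show List.splitOnP (fun x => x == '*') t = q :: qs from hS]]
      constructor
      · rw [evensC_cons]
        rw [evensC_cons] at h1
        simp [keepC, hc, ← h1]
      · simpa [keepC, hc] using h2

theorem jT_cons_cons (c : Char) (q : List Char) (qs : List (List Char)) :
    jT ((c :: q) :: qs) = c :: jF (q :: qs) := by
  cases qs <;> simp [jT, jF]

theorem jF_cons_cons (c : Char) (q : List Char) (qs : List (List Char)) :
    jF ((c :: q) :: qs) = c :: jF (q :: qs) := by
  cases qs <;> simp [jT, jF]

theorem coll_split (l : List Char) :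
    collC true l = jT (l.splitOn ' ') ∧ collC false l = jF (l.splitOn ' ') := by
  induction l with
  | nil => constructor <;> simp [List.splitOn, List.splitOnP_nil, jT, jF, collC]
  | cons c t ih =>
    obtain ⟨q, qs, hS⟩ : ∃ q qs, t.splitOn ' ' = q :: qs := by
      rcases hS : t.splitOn ' ' with _ | ⟨q, qs⟩
      · exact absurd hS (List.splitOnP_ne_nil _ _)
      · exact ⟨q, qs, rfl⟩
    have h1 := ih.1
    have h2 := ih.2
    rw [hS] at h1 h2
    by_cases hc : c = ' '
    · subst hc
      rw [show ((' ' :: t).splitOn ' ') = [] :: q :: qs by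
            simp [List.splitOn, List.splitOnP_cons,
              show List.splitOnP (fun x => x == ' ') t = q :: qs from hS]]
      constructor
      · rw [show jT ([] :: q :: qs) = jT (q :: qs) by simp [jT]]
        simpa [collC] using h1
      · rw [show jF ([] :: q :: qs) = ' ' :: jT (q :: qs) by simp [jF]]
        simp [collC, h1]
    · rw [show ((c :: t).splitOn ' ') = (c :: q) :: qs by
            simp [List.splitOn, List.splitOnP_cons, hc,
              show List.splitOnP (fun x => x == ' ') t = q :: qs from hS]]
      constructor
      · rw [jT_cons_cons]; simp [collC, hc, h2]
      · rw [jF_cons_cons]; simp [collC, hc, h2]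

theorem isspace_space : PySem.Chars.isspace ' ' = true := by decide

theorem strip_cons_space (x : List Char) : PySem.Chars.strip (' ' :: x) = PySem.Chars.strip x := by
  simp [PySem.Chars.strip, PySem.Chars.lstrip, List.dropWhile_cons, isspace_space]

theorem rstrip_append_space (x : List Char) :
    PySem.Chars.rstrip (x ++ [' ']) = PySem.Chars.rstrip x := by
  simp [PySem.Chars.rstrip, List.dropWhile_cons, isspace_space]

theorem strip_append_space (x : List Char) :
    PySem.Chars.strip (x ++ [' ']) = PySem.Chars.strip x := by
  unfold PySem.Chars.strip PySem.Chars.lstrip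
  rw [List.dropWhile_append]
  by_cases h : (x.dropWhile PySem.Chars.isspace).isEmpty
  · rw [List.isEmpty_iff] at h
    rw [h]
    simp [List.dropWhile_cons, isspace_space]
  · rw [if_neg h]
    exact rstrip_append_space _

theorem jT_all_empty (ps : List (List Char)) (h : ps.filter (fun p => p ≠ []) = []) :
    jT ps = [] := by
  induction ps with
  | nil => rfl
  | cons q t ih =>
    rw [List.filter_eq_nil_iff] at h
    have hq : q = [] := by simpa using h q (by simp)
    have ht : t.filter (fun p => p ≠ []) = [] := by
      rw [List.filter_eq_nil_iff]
      intro a ha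
      simpa using h a (List.mem_cons_of_mem _ ha)
    cases t with
    | nil => simp [jT, hq]
    | cons r rs => simp [jT, hq, ih ht]

theorem interF_nil : interF [] = [] := by simp [interF, PySem.Chars.join_nil]

theorem interF_cons_ne (q : List Char) (ps : List (List Char)) (hq : q ≠ [])
    (hf : ps.filter (fun p => p ≠ []) ≠ []) :
    interF (q :: ps) = q ++ ' ' :: interF ps := by
  unfold interF
  rw [List.filter_cons, if_pos (by simpa using hq)]
  rcases hr : ps.filter (fun p => p ≠ []) with _ | ⟨u, us⟩
  · exact absurd hr hf
  · rw [PySem.Chars.join_cons_cons]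
    simp

theorem jT_interF (ps : List (List Char)) :
    jT ps = interF ps ∨ jT ps = interF ps ++ [' '] := by
  induction ps with
  | nil => left; simp [jT, interF_nil]
  | cons q t ih =>
    cases t with
    | nil =>
      by_cases hq : q = [] <;> left <;>
        simp [jT, interF, List.filter_cons, hq, PySem.Chars.join_singleton, PySem.Chars.join_nil]
    | cons r rs =>
      by_cases hq : q = []
      · subst hq
        have : interF ([] :: r :: rs) = interF (r :: rs) := by
          simp [interF, List.filter_cons]
        rw [this, show jT ([] :: r :: rs) = jT (r :: rs) by simp [jT]]
        exact ih
      · by_cases hf : (r :: rs).filter (fun p => p ≠ []) = []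
        · right
          rw [show jT (q :: r :: rs) = q ++ ' ' :: jT (r :: rs) by simp [jT, hq]]
          rw [jT_all_empty _ hf]
          have hi : interF (q :: r :: rs) = q := by
            unfold interF
            rw [List.filter_cons, hf]
            simp [hq, PySem.Chars.join_singleton]
          rw [hi]
        · rw [show jT (q :: r :: rs) = q ++ ' ' :: jT (r :: rs) by simp [jT, hq]]
          rw [interF_cons_ne q _ hq hf]
          rcases ih with h | h
          · left; rw [h]
          · right; rw [h]; simp

theorem strip_jT (ps : List (List Char)) :
    PySem.Chars.strip (jT ps) = PySem.Chars.strip (interF ps) := by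
  rcases jT_interF ps with h | h
  · rw [h]
  · rw [h, strip_append_space]

theorem strip_jF (ps : List (List Char)) :
    PySem.Chars.strip (jF ps) = PySem.Chars.strip (interF ps) := by
  cases ps with
  | nil => rw [show jF [] = [] from rfl, interF_nil]
  | cons q t =>
    cases t with
    | nil =>
      by_cases hq : q = [] <;>
        simp [jF, interF, List.filter_cons, hq, PySem.Chars.join_singleton, PySem.Chars.join_nil]
    | cons r rs =>
      rw [show jF (q :: r :: rs) = q ++ ' ' :: jT (r :: rs) from rfl]
      by_cases hq : q = []
      · subst hq
        have hi : interF ([] :: r :: rs) = interF (r :: rs) := by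
          simp [interF, List.filter_cons]
        rw [hi]
        simpa [strip_cons_space] using strip_jT (r :: rs)
      · by_cases hf : (r :: rs).filter (fun p => p ≠ []) = []
        · rw [jT_all_empty _ hf]
          have hi : interF (q :: r :: rs) = q := by
            unfold interF
            rw [List.filter_cons, hf]
            simp [hq, PySem.Chars.join_singleton]
          rw [hi, strip_append_space]
        · rw [interF_cons_ne q _ hq hf]
          rcases jT_interF (r :: rs) with h | h
          · rw [h]
          · rw [h, show q ++ ' ' :: (interF (r :: rs) ++ [' ']) = (q ++ ' ' :: interF (r :: rs)) ++ [' '] by simp,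
              strip_append_space]

-- ===== VERDICT (by name: the statement is the Claim_ definition above) =====
theorem remove_actions_spec : Claim_equal_remove_actions := by
  intro tweet _
  unfold Spec_remove_actions remove_actions remove_actions_alt
  simp only []
  rw [join_nil_flatten, enum_even _ 0, if_pos (by norm_num), (split_keep tweet.toList).1]
  rw [foldA, List.nil_append, (coll_split (keepC true tweet.toList)).2, strip_jF]
  rfl
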